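-- pv_equiv track=rewrite | github.com/youngwoo2020/Rerec | 5.data_filtering.py | filter_common
-- ===== SOURCE A (Python) =====
-- from collections import defaultdict
--
-- def filter_common(user_items, user_t, item_t):
--
--     user_count = defaultdict(int)
--     item_count = defaultdict(int)
--     for user, item, _ in user_items:
--         user_count[user] += 1
--         item_count[item] += 1
--
--     User = {}
--     for user, item, timestamp in user_items:
--         if user_count[user] < user_t or item_count[item] < item_t:
--             continue
--         if user not in User.keys():
--             User[user] = []
--         User[user].append((item, timestamp))
--
--     new_User = {}
--     for userid in User.keys():
--         User[userid].sort(key=lambda x: x[1])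
--         new_hist = [i for i, t in User[userid]]
--         new_User[userid] = new_hist
--
--     return new_User
-- ===== SOURCE B (Python) =====
-- from collections import Counter
--
-- def filter_common(user_items, user_t, item_t):
--     user_count = Counter(u for u, _, _ in user_items)
--     item_count = Counter(i for _, i, _ in user_items)
--
--     def ok(u, i):
--         return user_count[u] >= user_t and item_count[i] >= item_t
--
--     # register qualifying users in input order (keys of the result dict)
--     result = {u: [] for u, i, _ in user_items if ok(u, i)}
--
--     # one pass over a globally stable-sorted copy: each user's items arrive
--     # already in per-user timestamp order (ties keep input order)
--     for u, i, _ in sorted(user_items, key=lambda e: e[2]):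
--         if ok(u, i):
--             result[u].append(i)
--     return result
-- ===== Notes on version B (the rewrite author's own statement) =====
-- stated objective: alternative
-- what changed: Instead of grouping (item,timestamp) pairs per user and sorting each user's history separately, B stable-sorts the whole event list by timestamp once and fills each qualifying user's history in a single pass (keys pre-registered in input order), so no per-group sorting or pair lists are needed.
import Mathlib
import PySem

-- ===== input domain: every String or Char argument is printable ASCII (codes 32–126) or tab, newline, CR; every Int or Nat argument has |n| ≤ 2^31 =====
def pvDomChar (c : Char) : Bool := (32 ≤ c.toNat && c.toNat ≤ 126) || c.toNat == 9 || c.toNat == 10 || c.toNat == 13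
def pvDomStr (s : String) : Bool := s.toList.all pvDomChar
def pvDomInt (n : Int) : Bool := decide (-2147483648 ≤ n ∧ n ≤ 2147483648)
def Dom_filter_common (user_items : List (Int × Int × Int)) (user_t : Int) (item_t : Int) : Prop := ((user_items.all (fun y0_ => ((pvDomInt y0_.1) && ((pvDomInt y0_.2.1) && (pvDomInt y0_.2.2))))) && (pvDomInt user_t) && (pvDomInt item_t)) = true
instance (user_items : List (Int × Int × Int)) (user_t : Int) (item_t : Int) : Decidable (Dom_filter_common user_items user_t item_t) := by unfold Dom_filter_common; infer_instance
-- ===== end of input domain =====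

-- B replaces A's per-user grouping-then-sorting by one global stable sort by timestamp
-- and a single filling pass (alternative decomposition, same asymptotic cost);
-- equivalence is about the returned dict (as an insertion-ordered association list).


-- ===== PORT A =====
-- user_count = defaultdict(int); for user, item, _ in user_items: user_count[user] += 1
def aUserCount (user_items : List (Int × Int × Int)) : PySem.Dict Int Int :=
  user_items.foldl (fun d e => d.modify e.1 0 (· + 1)) PySem.Dict.empty

-- item_count = defaultdict(int); for user, item, _ in user_items: item_count[item] += 1
def aItemCount (user_items : List (Int × Int × Int)) : PySem.Dict Int Int :=
  user_items.foldl (fun d e => d.modify e.2.1 0 (· + 1)) PySem.Dict.empty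

-- the second loop: User = {}; skip under-threshold events, else append (item, timestamp)
def aUser (user_items : List (Int × Int × Int)) (user_t : Int) (item_t : Int) :
    PySem.Dict Int (List (Int × Int)) :=
  user_items.foldl (fun d e =>
    if (aUserCount user_items).getD e.1 0 < user_t ∨ (aItemCount user_items).getD e.2.1 0 < item_t then d
    else ((if d.contains e.1 then d else d.insert e.1 []).modify e.1 [] (· ++ [(e.2.1, e.2.2)])))
    PySem.Dict.empty

-- third loop: sort each history by timestamp, keep the items; return new_User
def filter_common (user_items : List (Int × Int × Int)) (user_t : Int) (item_t : Int) : List (Int × List Int) :=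
  ((aUser user_items user_t item_t).keys.foldl (fun nd k =>
      nd.insert k ((PySem.List.sorted ((aUser user_items user_t item_t).getD k []) (fun x => x.2)).map (·.1)))
    PySem.Dict.empty).items

-- ===== PORT B =====
-- ok(u, i) = user_count[u] >= user_t and item_count[i] >= item_t (Counter lookups)
def bOk (user_items : List (Int × Int × Int)) (user_t : Int) (item_t : Int) (u i : Int) : Bool :=
  decide (user_t ≤ (PySem.Dict.counter (user_items.map (·.1))).getD u 0) &&
  decide (item_t ≤ (PySem.Dict.counter (user_items.map (·.2.1))).getD i 0)

def filter_common_alt (user_items : List (Int × Int × Int)) (user_t : Int) (item_t : Int) : List (Int × List Int) :=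
  -- for u, i, _ in sorted(user_items, key=lambda e: e[2]): if ok(u, i): result[u].append(i)
  -- starting from result = {u: [] for u, i, _ in user_items if ok(u, i)}
  -- (modify with default [] is exact: every appended-to user is already a key of result)
  ((PySem.List.sorted user_items (fun e => e.2.2)).foldl
      (fun d e => if bOk user_items user_t item_t e.1 e.2.1 then d.modify e.1 [] (· ++ [e.2.1]) else d)
      (user_items.foldl
        (fun d e => if bOk user_items user_t item_t e.1 e.2.1 then d.insert e.1 [] else d)
        PySem.Dict.empty)).items

-- ===== PRECONDITION & SPEC =====
def Spec_filter_common (user_items : List (Int × Int × Int)) (user_t : Int) (item_t : Int) (out : List (Int × List Int)) : Prop := out = filter_common_alt user_items user_t item_t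
instance (user_items : List (Int × Int × Int)) (user_t : Int) (item_t : Int) (out : List (Int × List Int)) : Decidable (Spec_filter_common user_items user_t item_t out) := by unfold Spec_filter_common; infer_instance

-- ===== CLAIM (what is proved, stated in full; the proofs are below) =====
def Claim_equal_filter_common : Prop := ∀ (user_items : List (Int × Int × Int)) (user_t : Int) (item_t : Int), Dom_filter_common user_items user_t item_t → Spec_filter_common user_items user_t item_t (filter_common user_items user_t item_t)

-- ===== LEMMAS AND PROOFS =====

-- inserting into a list whose elements all compare not-less puts x in front
lemma insertBy_cons_of_head {α κ : Type} [LinearOrder κ] (key : α → κ) (x : α) (l : List α)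
    (h : ∀ z ∈ l.head?, key x < key z) :
    PySem.List.insertBy (fun a b => decide (key a < key b)) x l = x :: l := by
  cases l with
  | nil => simp [PySem.List.insertBy]
  | cons y ys => simp [PySem.List.insertBy, h y rfl]

-- stable insertion into a key-sorted list commutes with filtering
lemma filter_insertBy {α κ : Type} [LinearOrder κ] (key : α → κ) (p : α → Bool) (x : α) (l : List α)
    (hs : l.Pairwise (fun a b => key a ≤ key b)) :
    (PySem.List.insertBy (fun a b => decide (key a < key b)) x l).filter p
      = if p x then PySem.List.insertBy (fun a b => decide (key a < key b)) x (l.filter p)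
        else l.filter p := by
  induction l with
  | nil => cases hpx : p x <;> simp [PySem.List.insertBy, hpx]
  | cons y ys ih =>
    rcases List.pairwise_cons.mp hs with ⟨hy, hys⟩
    by_cases hxy : key x < key y
    · have hfront : ∀ z ∈ ((y :: ys).filter p).head?, key x < key z := by
        intro z hz
        have hzmem : z ∈ (y :: ys).filter p := List.mem_of_mem_head? hz
        have hzmem' : z ∈ y :: ys := List.mem_of_mem_filter hzmem
        rcases List.mem_cons.mp hzmem' with h | h
        · exact h ▸ hxy
        · exact lt_of_lt_of_le hxy (hy z h)
      rw [insertBy_cons_of_head key x (y :: ys) (by intro z hz; simp at hz; exact hz ▸ hxy)]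
      rw [insertBy_cons_of_head key x ((y :: ys).filter p) hfront]
      cases hpx : p x <;> simp [hpx]
    · have : PySem.List.insertBy (fun a b => decide (key a < key b)) x (y :: ys)
          = y :: PySem.List.insertBy (fun a b => decide (key a < key b)) x ys := by
        simp [PySem.List.insertBy, hxy]
      rw [this]
      cases hpy : p y
      · cases hpx : p x <;>
          simp [hpy, hpx, ih hys]
      · cases hpx : p x <;>
          · simp only [List.filter_cons, hpy, ih hys, hpx]
            simp [PySem.List.insertBy, hxy]

-- a stable sort commutes with filtering (for any predicate)
lemma filter_sorted {α κ : Type} [LinearOrder κ] (key : α → κ) (p : α → Bool) (l : List α) :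
    (PySem.List.sorted l key).filter p = PySem.List.sorted (l.filter p) key := by
  induction l using List.reverseRecOn with
  | nil => simp [PySem.List.sorted]
  | append_singleton l x ih =>
    rw [PySem.List.sorted_eq_foldl_insertBy, List.foldl_append, ← PySem.List.sorted_eq_foldl_insertBy]
    rw [List.foldl_cons, List.foldl_nil]
    rw [filter_insertBy key p x _ (PySem.List.sorted_pairwise l key), ih]
    rw [List.filter_append]
    have hx : PySem.List.sorted (l.filter p ++ [x]) key
        = PySem.List.insertBy (fun a b => decide (key a < key b)) x (PySem.List.sorted (l.filter p) key) := by
      rw [PySem.List.sorted_eq_foldl_insertBy (l.filter p ++ [x]), List.foldl_append,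
        ← PySem.List.sorted_eq_foldl_insertBy, List.foldl_cons, List.foldl_nil]
    cases hpx : p x
    · simp [hpx]
    · simp [hpx, hx]

-- insertBy commutes with map when the comparison factors through the map
lemma map_insertBy {α β : Type} (g : α → β) (bf : β → β → Bool) (x : α) (l : List α) :
    (PySem.List.insertBy (fun a b => bf (g a) (g b)) x l).map g
      = PySem.List.insertBy bf (g x) (l.map g) := by
  induction l with
  | nil => simp [PySem.List.insertBy]
  | cons y ys ih =>
    by_cases h : bf (g x) (g y) = true
    · simp [PySem.List.insertBy, h]
    · simp only [Bool.not_eq_true] at h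
      simp [PySem.List.insertBy, h, ih]

-- sorting a mapped list = mapping the list sorted by the composed key
lemma sorted_map {α β κ : Type} [LT κ] [DecidableLT κ] (g : α → β) (key : β → κ) (l : List α) :
    PySem.List.sorted (l.map g) key = (PySem.List.sorted l (fun a => key (g a))).map g := by
  induction l using List.reverseRecOn with
  | nil => simp [PySem.List.sorted]
  | append_singleton l x ih =>
    rw [List.map_append, List.map_singleton]
    rw [PySem.List.sorted_eq_foldl_insertBy, List.foldl_append, ← PySem.List.sorted_eq_foldl_insertBy,
      List.foldl_cons, List.foldl_nil, ih]
    rw [PySem.List.sorted_eq_foldl_insertBy (l ++ [x]), List.foldl_append,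
      ← PySem.List.sorted_eq_foldl_insertBy, List.foldl_cons, List.foldl_nil]
    rw [map_insertBy g (fun a b => decide (key a < key b)) x]

-- A's "if user not in User: User[user] = []" before the append is redundant
lemma setdefault_modify_collapse {κ ν : Type} [BEq κ] [LawfulBEq κ]
    (d : PySem.Dict κ ν) (k : κ) (dflt : ν) (f : ν → ν) :
    ((if d.contains k then d else d.insert k dflt).modify k dflt f) = d.modify k dflt f := by
  by_cases h : d.contains k = true
  · simp [h]
  · simp only [Bool.not_eq_true] at h
    rw [if_neg (by simp [h])]
    simp only [PySem.Dict.modify]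
    rw [PySem.Dict.getD_insert_self, PySem.Dict.insert_insert_self,
      PySem.Dict.getD_of_not_contains d dflt h]

-- a fold that only ever inserts [] leaves every getD-with-[] at []
lemma getD_foldl_insert_nil {β : Type} (l : List β) (k : β → Int) (d : PySem.Dict Int (List Int))
    (u : Int) (h : d.getD u [] = []) :
    (l.foldl (fun d e => d.insert (k e) []) d).getD u [] = [] := by
  induction l generalizing d with
  | nil => exact h
  | cons e l ih =>
    refine ih _ ?_
    rw [PySem.Dict.getD_insert]
    split <;> simp [h]

theorem filter_common_eq (user_items : List (Int × Int × Int)) (user_t item_t : Int) :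
    filter_common user_items user_t item_t = filter_common_alt user_items user_t item_t := by
  classical
  set q : (Int × Int × Int) → Bool := fun e => bOk user_items user_t item_t e.1 e.2.1 with hq
  set qs : List (Int × Int × Int) := user_items.filter q with hqs
  set K : List Int := PySem.Set.ofList (qs.map (·.1)) with hK
  -- counts agree
  have hcu : aUserCount user_items = PySem.Dict.counter (user_items.map (·.1)) := by
    rw [PySem.Dict.counter_eq_foldl, List.foldl_map]; rfl
  have hci : aItemCount user_items = PySem.Dict.counter (user_items.map (·.2.1)) := by
    rw [PySem.Dict.counter_eq_foldl, List.foldl_map]; rfl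
  -- A's grouping dict, rewritten as a plain modify-fold over qs
  have hUser : aUser user_items user_t item_t
      = qs.foldl (fun d e => d.modify e.1 [] (· ++ [(e.2.1, e.2.2)])) PySem.Dict.empty := by
    unfold aUser
    rw [PySem.List.foldl_congr_mem _ _
      (fun d e => if q e then d.modify e.1 [] (· ++ [(e.2.1, e.2.2)]) else d) _ ?_]
    · rw [PySem.List.foldl_if_eq_foldl_filter]
    · intro d e _
      dsimp only
      by_cases hqe : q e = true
      · have : ¬ ((aUserCount user_items).getD e.1 0 < user_t ∨ (aItemCount user_items).getD e.2.1 0 < item_t) := by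
          simp only [hq, bOk, Bool.and_eq_true, decide_eq_true_eq] at hqe
          rw [hcu, hci]; omega
        rw [if_neg this, if_pos hqe, setdefault_modify_collapse]
      · have : (aUserCount user_items).getD e.1 0 < user_t ∨ (aItemCount user_items).getD e.2.1 0 < item_t := by
          simp only [hq, bOk, Bool.and_eq_true, decide_eq_true_eq] at hqe
          rw [hcu, hci]; omega
        rw [if_pos this, if_neg hqe]
  -- A's grouping dict: keys, nodup, values
  have hUkeys : (aUser user_items user_t item_t).keys = K := by
    rw [hUser]
    have := PySem.Dict.keys_foldl_modify_key qs (fun e => e.1) ([] : List (Int × Int))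
      (fun _ e v => v ++ [(e.2.1, e.2.2)]) PySem.Dict.empty
    simpa [PySem.Set.update_empty] using this
  have hUnodup : (aUser user_items user_t item_t).keys.Nodup := by
    rw [hUser]
    exact PySem.Dict.nodup_keys_foldl_modify_key qs (fun e => e.1) _ _ _ (by simp)
  have hUgetD : ∀ u : Int, (aUser user_items user_t item_t).getD u []
      = (qs.filter (fun e => e.1 == u)).map (fun e => (e.2.1, e.2.2)) := by
    intro u
    rw [hUser,
      show List.foldl (fun (d : PySem.Dict Int (List (Int × Int))) (e : Int × Int × Int) =>
          d.modify e.1 [] (· ++ [(e.2.1, e.2.2)])) PySem.Dict.empty qs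
        = List.foldl (fun d p => d.modify p.1 [] (· ++ [p.2])) PySem.Dict.empty
            (qs.map (fun e => (e.1, (e.2.1, e.2.2)))) from by rw [List.foldl_map]]
    rw [PySem.Dict.getD_foldl_modify_append]
    simp
  -- B's dict-comprehension pass: keys, nodup, all values []
  set result0 : PySem.Dict Int (List Int) :=
    user_items.foldl (fun d e => if bOk user_items user_t item_t e.1 e.2.1 then d.insert e.1 [] else d)
      PySem.Dict.empty with hr0
  have hr0' : result0 = qs.foldl (fun d e => d.insert e.1 []) PySem.Dict.empty := by
    rw [hr0, PySem.List.foldl_if_eq_foldl_filter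
      (fun e : Int × Int × Int => bOk user_items user_t item_t e.1 e.2.1)
      (fun d e => d.insert e.1 []) user_items PySem.Dict.empty]
  have h0keys : result0.keys = K := by
    rw [hr0']
    have := PySem.Dict.keys_foldl_insert_key qs (fun e => e.1)
      (fun _ _ => ([] : List Int)) PySem.Dict.empty
    simpa [PySem.Set.update_empty] using this
  have h0nodup : result0.keys.Nodup := by
    rw [hr0']
    exact PySem.Dict.nodup_keys_foldl_insert_key qs (fun e => e.1) _ _ (by simp)
  have h0getD : ∀ u : Int, result0.getD u [] = [] := by
    intro u; rw [hr0']
    exact getD_foldl_insert_nil qs (fun e => e.1) _ u (by simp)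
  -- B's filling pass, rewritten as a modify-fold over the sorted qs
  set resultB : PySem.Dict Int (List Int) :=
    (PySem.List.sorted user_items (fun e => e.2.2)).foldl
      (fun d e => if bOk user_items user_t item_t e.1 e.2.1 then d.modify e.1 [] (· ++ [e.2.1]) else d)
      result0 with hrB
  have hrB' : resultB = (PySem.List.sorted qs (fun e => e.2.2)).foldl
      (fun d e => d.modify e.1 [] (· ++ [e.2.1])) result0 := by
    rw [hrB, PySem.List.foldl_if_eq_foldl_filter
      (fun e : Int × Int × Int => bOk user_items user_t item_t e.1 e.2.1)
      (fun d e => d.modify e.1 [] (· ++ [e.2.1])) _ result0]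
    rw [filter_sorted (fun e => e.2.2) q user_items]
  have hsortmem : ∀ y ∈ (PySem.List.sorted qs (fun e => e.2.2)).map (fun e => e.1), y ∈ K := by
    intro y hy
    rcases List.mem_map.mp hy with ⟨e, he, rfl⟩
    have : e ∈ qs := (PySem.List.mem_sorted _ _ _ _).mp he
    exact (PySem.Set.mem_ofList _ _).mpr (List.mem_map_of_mem this)
  have hBkeys : resultB.keys = K := by
    rw [hrB']
    have hk2 : (List.foldl (fun (d : PySem.Dict Int (List Int)) (e : Int × Int × Int) =>
          d.modify e.1 [] fun x => x ++ [e.2.1]) result0 (PySem.List.sorted qs (fun e => e.2.2))).keys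
        = PySem.Set.update result0.keys ((PySem.List.sorted qs (fun e => e.2.2)).map (fun e => e.1)) :=
      PySem.Dict.keys_foldl_modify_key _ _ _ _ _
    rw [hk2, PySem.Set.update_eq_append_filter, h0keys]
    have hfilt : ∀ y ∈ PySem.Set.ofList ((PySem.List.sorted qs (fun e => e.2.2)).map (fun e => e.1)),
        (!PySem.Set.contains K y) = false := by
      intro y hy
      have hmem := hsortmem y ((PySem.Set.mem_ofList _ _).mp hy)
      simpa using hmem
    rw [List.filter_eq_nil_iff.mpr (fun y hy => by rw [hfilt y hy]; simp), List.append_nil]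
  have hBnodup : resultB.keys.Nodup := by rw [hBkeys, hK]; exact PySem.Set.nodup_ofList _
  have hBgetD : ∀ u : Int, resultB.getD u []
      = ((PySem.List.sorted qs (fun e => e.2.2)).filter (fun e => e.1 == u)).map (fun e => e.2.1) := by
    intro u
    rw [hrB',
      show List.foldl (fun (d : PySem.Dict Int (List Int)) (e : Int × Int × Int) =>
          d.modify e.1 [] (· ++ [e.2.1])) result0 (PySem.List.sorted qs (fun e => e.2.2))
        = List.foldl (fun d p => d.modify p.1 [] (· ++ [p.2])) result0
            ((PySem.List.sorted qs (fun e => e.2.2)).map (fun e => (e.1, e.2.1))) from by rw [List.foldl_map]]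
    rw [PySem.Dict.getD_foldl_modify_append, h0getD]
    simp [List.filter_map, Function.comp_def]
  -- per-user histories agree
  have hval : ∀ u : Int,
      (PySem.List.sorted ((aUser user_items user_t item_t).getD u []) (fun x => x.2)).map (·.1)
        = resultB.getD u [] := by
    intro u
    rw [hUgetD u, hBgetD u]
    rw [sorted_map (fun e => (e.2.1, e.2.2)) (fun x => x.2) (qs.filter (fun e => e.1 == u))]
    have hkey : (fun a : Int × Int × Int => ((a.2.1, a.2.2) : Int × Int).2)
        = (fun e : Int × Int × Int => e.2.2) := rfl
    rw [hkey, List.map_map, ← filter_sorted (fun e => e.2.2) (fun e => e.1 == u) qs]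
    simp [Function.comp_def]
  -- assemble the two association lists
  unfold filter_common filter_common_alt
  rw [hUkeys]
  rw [PySem.Dict.items_foldl_insert_fresh _ _ _ _ (by simp) (by simp [hK])]
  simp only [show (PySem.Dict.empty : PySem.Dict Int (List Int)).items = [] from rfl, List.nil_append]
  rw [show ((PySem.List.sorted user_items fun e => e.2.2).foldl
      (fun d e => if bOk user_items user_t item_t e.1 e.2.1 then d.modify e.1 [] (· ++ [e.2.1]) else d)
      (user_items.foldl (fun d e => if bOk user_items user_t item_t e.1 e.2.1 then d.insert e.1 [] else d)
        PySem.Dict.empty)) = resultB from rfl]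
  rw [PySem.Dict.items_eq_map_keys resultB hBnodup [], hBkeys]
  exact List.map_congr_left (fun u _ => by rw [hval u])

-- ===== VERDICT (by name: the statement is the Claim_ definition above) =====
theorem filter_common_spec : Claim_equal_filter_common := by
  intro user_items user_t item_t _
  unfold Spec_filter_common
  exact filter_common_eq user_items user_t item_t
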